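-- pv_equiv track=rewrite | github.com/anveshaajain/BackEnd-with-Py | detectloop.py | has_loop
-- ===== SOURCE A (Python) =====
-- def has_loop(d):
--     visited = set()
--     key = next(iter(d))
--     while key in d:
--         if key in visited:
--             return True
--         visited.add(key)
--         key = d[key]
--     return False
-- ===== SOURCE B (Python) =====
-- def has_loop(d):
--     # Floyd's tortoise-and-hare: two moving pointers, O(1) extra space,
--     # no visited set.  The chain either exits the dict (hare hits a
--     # missing key -> False) or is eventually periodic, in which case the
--     # hare catches the tortoise inside the cycle (-> True).
--     slow = fast = next(iter(d))
--     while True: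
--         if fast not in d:
--             return False
--         fast = d[fast]
--         if fast not in d:
--             return False
--         fast = d[fast]
--         slow = d[slow]
--         if slow == fast:
--             return True
-- ===== Notes on version B (the rewrite author's own statement) =====
-- stated objective: alternative
-- what changed: Replaced the visited-set scan with Floyd's tortoise-and-hare: two pointers (hare moves two gated steps, tortoise one) and a pointer-equality test replace the set; O(1) extra space instead of O(n).
import Mathlib
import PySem

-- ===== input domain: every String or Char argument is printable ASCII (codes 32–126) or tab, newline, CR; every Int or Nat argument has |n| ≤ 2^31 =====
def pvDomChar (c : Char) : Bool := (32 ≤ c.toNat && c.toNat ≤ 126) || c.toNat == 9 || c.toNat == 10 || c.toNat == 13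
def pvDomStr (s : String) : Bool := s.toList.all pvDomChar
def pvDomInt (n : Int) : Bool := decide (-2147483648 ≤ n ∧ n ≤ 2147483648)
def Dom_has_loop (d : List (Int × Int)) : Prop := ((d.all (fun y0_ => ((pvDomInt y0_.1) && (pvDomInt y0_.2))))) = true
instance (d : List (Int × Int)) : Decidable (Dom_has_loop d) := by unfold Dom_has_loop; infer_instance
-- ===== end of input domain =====

-- B replaces A's visited-set chain scan with Floyd's tortoise-and-hare (two pointers,
-- O(1) extra space); objective: alternative algorithm, same asymptotic time.

-- ===== PORT A =====
-- 'key in d' / 'd[key]' on the association list (first match = dict lookup).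
def pvLookup (d : List (Int × Int)) (k : Int) : Option Int :=
  match d with
  | [] => none
  | (a, b) :: t => if a = k then some b else pvLookup t k

-- 'while key in d: if key in visited: return True; visited.add(key); key = d[key]'
-- as fuel recursion; fuel d.length+1 provably suffices (aGo_false_exit below never needs more).
def aGo (d : List (Int × Int)) (visited : PySem.Set Int) (key : Int) : Nat → Bool
  | 0 => false
  | fuel + 1 =>
    match pvLookup d key with
    | none => false                  -- 'key in d' fails: exit loop, return False
    | some v =>
      if PySem.Set.contains visited key then true
      else aGo d (PySem.Set.add visited key) v fuel

def has_loop (d : List (Int × Int)) : Bool :=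
  match d with
  | [] => false                      -- unreachable under Pre_ (Python raises StopIteration)
  | (k, _) :: _ => aGo d PySem.Set.empty k (d.length + 1)

-- ===== PORT B =====
-- 'fast in d' / 'd[fast]' in one step: first matching pair, its value.
def pvNext (d : List (Int × Int)) (k : Int) : Option Int :=
  (d.find? (fun p => p.1 == k)).map Prod.snd

-- body of B's 'while True' loop: hare advances twice (each step gated by 'in d'),
-- tortoise once, then the pointers are compared.  Fuel is a totality guard only:
-- d.length^2+1 iterations provably suffice (floyd_true_of_meet below).
def floydGo (d : List (Int × Int)) (slow fast : Int) : Nat → Bool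
  | 0 => false
  | fuel + 1 =>
    match pvNext d fast with
    | none => false                  -- 'if fast not in d: return False'
    | some f1 =>
      match pvNext d f1 with
      | none => false                -- second 'if fast not in d: return False'
      | some f2 =>
        match pvNext d slow with
        | none => false              -- Python 'slow = d[slow]': KeyError unreachable (slow trails fast)
        | some s1 => if s1 = f2 then true else floydGo d s1 f2 fuel

def has_loop_alt (d : List (Int × Int)) : Bool :=
  match d with
  | [] => false                      -- unreachable under Pre_ (Python raises StopIteration)
  | (k, _) :: _ => floydGo d k k (d.length * d.length + 1)

-- ===== PRECONDITION & SPEC =====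
-- Pre_ excludes only the empty dict, on which both A and B raise StopIteration at next(iter(d)).
def Pre_has_loop (d : List (Int × Int)) : Prop := d ≠ []
instance (d : List (Int × Int)) : Decidable (Pre_has_loop d) := by unfold Pre_has_loop; infer_instance
def pvWitness_has_loop : (List (Int × Int)) := [(0, 0)]

def Spec_has_loop (d : List (Int × Int)) (out : Bool) : Prop := out = has_loop_alt d
instance (d : List (Int × Int)) (out : Bool) : Decidable (Spec_has_loop d out) := by unfold Spec_has_loop; infer_instance

-- ===== CLAIM (what is proved, stated in full; the proofs are below) =====
def Claim_equal_has_loop : Prop := ∀ (d : List (Int × Int)), Dom_has_loop d → Pre_has_loop d → Spec_has_loop d (has_loop d)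

-- ===== LEMMAS AND PROOFS =====

-- the chain k, d[k], d[d[k]], …: pvChain d m k = the key after m steps, none once the chain left d
def pvChain (d : List (Int × Int)) : Nat → Int → Option Int
  | 0, k => some k
  | m + 1, k =>
    match pvLookup d k with
    | none => none
    | some v => pvChain d m v

theorem pvNext_eq (d : List (Int × Int)) (k : Int) : pvNext d k = pvLookup d k := by
  induction d with
  | nil => simp [pvNext, pvLookup]
  | cons p t ih =>
    obtain ⟨a, b⟩ := p
    by_cases h : a = k
    · simp [pvNext, pvLookup, h]
    · rw [pvLookup, if_neg h, ← ih]
      unfold pvNext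
      rw [List.find?_cons_of_neg (by simp [h])]

theorem chain_one (d : List (Int × Int)) (k : Int) : pvChain d 1 k = pvLookup d k := by
  simp only [pvChain]
  cases pvLookup d k <;> rfl

theorem chain_add (d : List (Int × Int)) : ∀ (a b : Nat) (k : Int),
    pvChain d (a + b) k = (pvChain d a k).bind (pvChain d b) := by
  intro a
  induction a with
  | zero => intro b k; simp [pvChain]
  | succ n ih =>
    intro b k
    have : n + 1 + b = (n + b) + 1 := by omega
    rw [this]
    simp only [pvChain]
    cases pvLookup d k with
    | none => rfl
    | some v => exact ih b v

theorem chain_succ_right (d : List (Int × Int)) (n : Nat) (k : Int) :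
    pvChain d (n + 1) k = (pvChain d n k).bind (pvLookup d) := by
  rw [chain_add d n 1]
  cases pvChain d n k with
  | none => rfl
  | some v => simp [chain_one]

theorem chain_none_succ (d : List (Int × Int)) : ∀ (m : Nat) (k : Int),
    pvChain d m k = none → pvChain d (m + 1) k = none := by
  intro m k h
  rw [chain_succ_right, h]
  rfl

theorem chain_none_mono (d : List (Int × Int)) {m m' : Nat} (hle : m ≤ m') (k : Int)
    (h : pvChain d m k = none) : pvChain d m' k = none := by
  induction m' with
  | zero => have hm0 : m = 0 := Nat.le_zero.mp hle; exact hm0 ▸ h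
  | succ n ih =>
    rcases Nat.lt_or_ge m (n + 1) with hlt | hge
    · exact chain_none_succ d n k (ih (by omega))
    · have : m = n + 1 := by omega
      exact this ▸ h

theorem chain_isSome_of_le (d : List (Int × Int)) {m m' : Nat} (hle : m ≤ m') (k : Int)
    (h : (pvChain d m' k).isSome) : (pvChain d m k).isSome := by
  cases hm : pvChain d m k with
  | none => rw [chain_none_mono d hle k hm] at h; simp at h
  | some v => rfl

theorem lookup_mem_keys (d : List (Int × Int)) (k v : Int) (h : pvLookup d k = some v) :
    k ∈ d.map Prod.fst := by
  induction d with
  | nil => simp [pvLookup] at h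
  | cons p t ih =>
    obtain ⟨a, b⟩ := p
    simp only [pvLookup] at h
    by_cases hak : a = k
    · simp [hak]
    · simp only [if_neg hak] at h
      simp [ih h]

theorem alive_of_closed (d : List (Int × Int)) (V : List Int)
    (hV : ∀ x ∈ V, ∃ y, pvLookup d x = some y ∧ y ∈ V) :
    ∀ (m : Nat) (k : Int), k ∈ V → (pvChain d m k).isSome := by
  intro m
  induction m with
  | zero => intro k _; simp [pvChain]
  | succ n ih =>
    intro k hk
    obtain ⟨y, hy, hyV⟩ := hV k hk
    simp only [pvChain, hy]
    exact ih y hyV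

-- Set facts we use (PySem.Set Int is a duplicate-free List Int built by add)
theorem set_contains_iff (V : PySem.Set Int) (k : Int) :
    PySem.Set.contains V k = true ↔ k ∈ V := by
  simp [PySem.Set.contains]

theorem mem_set_add (V : PySem.Set Int) (k x : Int) :
    x ∈ PySem.Set.add V k ↔ x ∈ V ∨ x = k := by
  by_cases h : PySem.Set.contains V k = true
  · have hk : k ∈ V := (set_contains_iff V k).mp h
    simp only [PySem.Set.add, h, if_pos]
    constructor
    · exact Or.inl
    · rintro (hx | rfl); exact hx; exact hk
  · simp only [PySem.Set.add, h]
    simp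

theorem aGo_true_alive (d : List (Int × Int)) : ∀ (fuel : Nat) (V : PySem.Set Int) (k : Int),
    (∀ x ∈ V, ∃ y, pvLookup d x = some y ∧ (y ∈ V ∨ y = k)) →
    aGo d V k fuel = true → ∀ m, (pvChain d m k).isSome := by
  intro fuel
  induction fuel with
  | zero => intro V k _ h; simp [aGo] at h
  | succ n ih =>
    intro V k hcl h
    simp only [aGo] at h
    cases hl : pvLookup d k with
    | none => rw [hl] at h; simp at h
    | some v =>
      by_cases hmem : PySem.Set.contains V k = true
      · clear h
        have hkV : k ∈ V := (set_contains_iff V k).mp hmem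
        intro m
        refine alive_of_closed d V ?_ m k hkV
        intro x hx
        obtain ⟨y, hy, hyVk⟩ := hcl x hx
        exact ⟨y, hy, by rcases hyVk with h' | rfl; exact h'; exact hkV⟩
      · simp only [hl, hmem] at h
        have hcl' : ∀ x ∈ PySem.Set.add V k, ∃ y, pvLookup d x = some y ∧ (y ∈ PySem.Set.add V k ∨ y = v) := by
          intro x hx
          rcases (mem_set_add V k x).mp hx with hxV | rfl
          · obtain ⟨y, hy, hyVk⟩ := hcl x hxV
            exact ⟨y, hy, Or.inl ((mem_set_add V k y).mpr hyVk)⟩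
          · exact ⟨v, hl, Or.inr rfl⟩
        have hv := ih (PySem.Set.add V k) v hcl' h
        intro m
        cases m with
        | zero => simp [pvChain]
        | succ m' => simp only [pvChain, hl]; exact hv m'

theorem aGo_false_exit (d : List (Int × Int)) : ∀ (fuel : Nat) (V : PySem.Set Int) (k : Int),
    V.Nodup → (∀ x ∈ V, x ∈ d.map Prod.fst) →
    (d.map Prod.fst).length < V.length + fuel →
    aGo d V k fuel = false → ∃ m < fuel, pvChain d (m + 1) k = none := by
  intro fuel
  induction fuel with
  | zero =>
    intro V k hnd hsub hlen _
    exfalso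
    have : V.length ≤ (d.map Prod.fst).length := by
      calc V.length = V.toFinset.card := (List.toFinset_card_of_nodup hnd).symm
        _ ≤ (d.map Prod.fst).toFinset.card := Finset.card_le_card (fun x hx => by
            simp only [List.mem_toFinset] at *; exact hsub x hx)
        _ ≤ (d.map Prod.fst).length := (d.map Prod.fst).toFinset_card_le
    omega
  | succ n ih =>
    intro V k hnd hsub hlen h
    simp only [aGo] at h
    cases hl : pvLookup d k with
    | none =>
      exact ⟨0, Nat.succ_pos n, by simp [pvChain, hl]⟩
    | some v =>
      by_cases hmem : PySem.Set.contains V k = true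
      · simp [hl] at h
        exact absurd ((set_contains_iff V k).mp hmem) h.1
      · simp only [hl, hmem] at h
        have hkV : k ∉ V := fun hk => hmem ((set_contains_iff V k).mpr hk)
        have hadd : PySem.Set.add V k = V ++ [k] := by
          simp only [PySem.Set.add, hmem, Bool.false_eq_true, if_false]
        obtain ⟨m, hm, hnone⟩ := ih (PySem.Set.add V k) v
          (by rw [hadd]
              simp only [List.nodup_append, List.nodup_singleton]
              refine ⟨hnd, trivial, ?_⟩
              intro a ha b hb
              simp only [List.mem_singleton] at hb
              subst hb
              exact fun e => hkV (e ▸ ha))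
          (by intro x hx
              rcases (mem_set_add V k x).mp hx with hxV | rfl
              · exact hsub x hxV
              · exact lookup_mem_keys d x v hl)
          (by rw [hadd]
              simp only [List.length_append, List.length_cons, List.length_nil]
              omega)
          h
        exact ⟨m + 1, by omega, by simp only [pvChain, hl]; exact hnone⟩

-- a pointer meeting (pvChain j = pvChain 2j, j ≥ 1) forces the chain to live forever
theorem meet_alive (d : List (Int × Int)) (k0 : Int) (j : Nat) (hj : 1 ≤ j)
    (hmeet : pvChain d j k0 = pvChain d (2 * j) k0) (hsome : (pvChain d j k0).isSome) :
    ∀ m, (pvChain d m k0).isSome := by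
  obtain ⟨x, hx⟩ := Option.isSome_iff_exists.mp hsome
  have h2j : pvChain d (2 * j) k0 = some x := hmeet ▸ hx
  have hcycle : pvChain d j x = some x := by
    have : pvChain d (j + j) k0 = (pvChain d j k0).bind (pvChain d j) := chain_add d j j k0
    rw [show j + j = 2 * j by omega, h2j, hx] at this
    exact this.symm
  have hmul : ∀ q, pvChain d (q * j) x = some x := by
    intro q
    induction q with
    | zero => simp [pvChain]
    | succ n ih =>
      have : (n + 1) * j = n * j + j := by ring
      rw [this, chain_add, ih]
      exact hcycle
  intro m
  rcases Nat.lt_or_ge j m with hgt | hle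
  swap
  · exact chain_isSome_of_le d hle k0 (hx ▸ rfl)
  · have hm : m = j + (m - j) := by omega
    have ht : m - j = ((m - j) / j) * j + (m - j) % j := by
      rw [Nat.mul_comm]; exact (Nat.div_add_mod (m - j) j).symm
    rw [hm, chain_add, hx, Option.bind_some, ht, chain_add, hmul, Option.bind_some]
    exact chain_isSome_of_le d (le_of_lt (Nat.mod_lt _ (by omega))) x (hcycle ▸ rfl)

-- if Floyd returns True, the pointers met: pvChain j = pvChain 2j for some j ≥ 1
theorem floyd_true_meet (d : List (Int × Int)) (k0 : Int) : ∀ (fuel i : Nat) (s f : Int),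
    pvChain d i k0 = some s → pvChain d (2 * i) k0 = some f →
    floydGo d s f fuel = true →
    ∃ j, 1 ≤ j ∧ pvChain d j k0 = pvChain d (2 * j) k0 ∧ (pvChain d j k0).isSome := by
  intro fuel
  induction fuel with
  | zero => intro i s f _ _ h; simp [floydGo] at h
  | succ n ih =>
    intro i s f hs hf h
    simp only [floydGo, pvNext_eq] at h
    split at h
    · exact absurd h (by simp)
    · rename_i f1 hl1
      split at h
      · exact absurd h (by simp)
      · rename_i f2 hl2
        split at h
        · exact absurd h (by simp)
        · rename_i s1 hl3
          have hs1 : pvChain d (i + 1) k0 = some s1 := by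
            rw [chain_succ_right, hs]; exact hl3
          have hf1 : pvChain d (2 * i + 1) k0 = some f1 := by
            rw [chain_succ_right, hf]; exact hl1
          have hf2 : pvChain d (2 * (i + 1)) k0 = some f2 := by
            rw [show 2 * (i + 1) = (2 * i + 1) + 1 by ring, chain_succ_right, hf1]; exact hl2
          by_cases heq : s1 = f2
          · exact ⟨i + 1, by omega, by rw [hs1, hf2, heq], by rw [hs1]; rfl⟩
          · rw [if_neg heq] at h
            exact ih (i + 1) s1 f2 hs1 hf2 h
  
-- if the chain lives forever and the pointers meet within the fuel, Floyd returns True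
theorem floyd_true_of_meet (d : List (Int × Int)) (k0 : Int) : ∀ (fuel i : Nat) (s f : Int),
    (∀ m, (pvChain d m k0).isSome) →
    (∃ j, i < j ∧ j ≤ i + fuel ∧ pvChain d j k0 = pvChain d (2 * j) k0) →
    pvChain d i k0 = some s → pvChain d (2 * i) k0 = some f →
    floydGo d s f fuel = true := by
  intro fuel
  induction fuel with
  | zero =>
    intro i s f _ hmeet _ _
    obtain ⟨j, h1, h2, _⟩ := hmeet
    omega
  | succ n ih =>
    intro i s f halive hmeet hs hf
    obtain ⟨f1, hl1⟩ : ∃ f1, pvLookup d f = some f1 := by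
      have := halive (2 * i + 1)
      rw [chain_succ_right, hf] at this
      exact Option.isSome_iff_exists.mp this
    obtain ⟨f2, hl2⟩ : ∃ f2, pvLookup d f1 = some f2 := by
      have := halive (2 * i + 2)
      rw [show 2 * i + 2 = (2 * i + 1) + 1 by ring, chain_succ_right, chain_succ_right, hf, Option.bind_some, hl1] at this
      exact Option.isSome_iff_exists.mp this
    obtain ⟨s1, hl3⟩ : ∃ s1, pvLookup d s = some s1 := by
      have := halive (i + 1)
      rw [chain_succ_right, hs] at this
      exact Option.isSome_iff_exists.mp this
    have hs1 : pvChain d (i + 1) k0 = some s1 := by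
      rw [chain_succ_right, hs]; exact hl3
    have hf2 : pvChain d (2 * (i + 1)) k0 = some f2 := by
      rw [show 2 * (i + 1) = (2 * i + 1) + 1 by ring, chain_succ_right, chain_succ_right, hf, Option.bind_some, hl1]
      exact hl2
    simp only [floydGo, pvNext_eq, hl1, hl2, hl3]
    by_cases heq : s1 = f2
    · rw [if_pos heq]
    · rw [if_neg heq]
      obtain ⟨j, hj1, hj2, hjm⟩ := hmeet
      refine ih (i + 1) s1 f2 halive ⟨j, ?_, by omega, hjm⟩ hs1 hf2
      rcases Nat.lt_or_ge (i + 1) j with hlt | hge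
      · exact hlt
      · exfalso
        have : j = i + 1 := by omega
        subst this
        rw [hs1, hf2] at hjm
        exact heq (Option.some.injEq _ _ ▸ hjm)

-- if the chain lives forever, the pointers provably meet within d.length² steps
theorem exists_meet (d : List (Int × Int)) (k0 : Int) (hd : 1 ≤ d.length)
    (halive : ∀ m, (pvChain d m k0).isSome) :
    ∃ j, 1 ≤ j ∧ j ≤ d.length * d.length ∧ pvChain d j k0 = pvChain d (2 * j) k0 := by
  set n := d.length with hn
  -- every chain value is a key of d
  have hmem : ∀ m, ∃ x, pvChain d m k0 = some x ∧ x ∈ d.map Prod.fst := by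
    intro m
    obtain ⟨x, hx⟩ := Option.isSome_iff_exists.mp (halive m)
    have := halive (m + 1)
    rw [chain_succ_right, hx] at this
    obtain ⟨y, hy⟩ := Option.isSome_iff_exists.mp this
    exact ⟨x, hx, lookup_mem_keys d x y hy⟩
  -- pigeonhole: some two of the first n+1 chain values coincide
  have hpigeon : ∃ a b, a < b ∧ b ≤ n ∧ pvChain d a k0 = pvChain d b k0 := by
    have hcard : (d.map Prod.fst).toFinset.card < (Finset.range (n + 1)).card := by
      have h1 : (d.map Prod.fst).toFinset.card ≤ (d.map Prod.fst).length :=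
        (d.map Prod.fst).toFinset_card_le
      simp only [List.length_map] at h1
      simp only [Finset.card_range]
      omega
    have hmaps : ∀ a ∈ Finset.range (n + 1),
        (fun m => (pvChain d m k0).getD 0) a ∈ (d.map Prod.fst).toFinset := by
      intro a _
      obtain ⟨x, hx, hxk⟩ := hmem a
      simp [hx, hxk]
    obtain ⟨a, ha, b, hb, hab, hfab⟩ :=
      Finset.exists_ne_map_eq_of_card_lt_of_maps_to hcard hmaps
    simp only [Finset.mem_range] at ha hb
    obtain ⟨x, hx, _⟩ := hmem a
    obtain ⟨y, hy, _⟩ := hmem b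
    rw [hx, hy] at hfab
    simp only [Option.getD_some] at hfab
    subst hfab
    rcases Nat.lt_trichotomy a b with h | h | h
    · exact ⟨a, b, h, by omega, by rw [hx, hy]⟩
    · omega
    · exact ⟨b, a, h, by omega, by rw [hx, hy]⟩
  obtain ⟨a, b, hab, hbn, habeq⟩ := hpigeon
  obtain ⟨x, hx, _⟩ := hmem a
  have hbx : pvChain d b k0 = some x := habeq ▸ hx
  set p := b - a with hp
  have hp1 : 1 ≤ p := by omega
  -- x is on a cycle of period p
  have hcycle : pvChain d p x = some x := by
    have : pvChain d (a + p) k0 = (pvChain d a k0).bind (pvChain d p) := chain_add d a p k0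
    rw [show a + p = b by omega, hbx, hx, Option.bind_some] at this
    exact this.symm
  have hmul : ∀ q, pvChain d (q * p) x = some x := by
    intro q
    induction q with
    | zero => simp [pvChain]
    | succ m ih =>
      rw [show (m + 1) * p = m * p + p by ring, chain_add, ih, Option.bind_some]
      exact hcycle
  -- the meeting point: j = (max a 1) * p
  refine ⟨(max a 1) * p, ?_, ?_, ?_⟩
  · have : 1 ≤ max a 1 := le_max_right a 1
    exact Nat.one_le_iff_ne_zero.mpr (by positivity)
  · have h1 : max a 1 ≤ n := by
      rcases le_total a 1 with h | h
      · omega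
      · omega
    have h2 : p ≤ n := by omega
    exact Nat.mul_le_mul h1 h2
  · set j := (max a 1) * p with hj
    have hja : a ≤ j := by
      by_cases h : a ≤ 1
      · have : max a 1 = 1 := by omega
        rw [hj, this]; omega
      · have : max a 1 = a := by omega
        rw [hj, this]
        calc a = a * 1 := (Nat.mul_one a).symm
          _ ≤ a * p := Nat.mul_le_mul_left a hp1
    have key : ∀ t, pvChain d (a + t + j) k0 = pvChain d (a + t) k0 := by
      intro t
      rw [show a + t + j = a + (j + t) by omega, chain_add, hx, Option.bind_some,
          chain_add, hmul, Option.bind_some,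
          chain_add d a t k0, hx, Option.bind_some]
    have := key (j - a)
    rw [show a + (j - a) + j = j + j by omega, show a + (j - a) = j by omega] at this
    rw [show 2 * j = j + j by omega]
    exact this.symm

-- ===== VERDICT (by name: the statement is the Claim_ definition above) =====
theorem has_loop_spec : Claim_equal_has_loop := by
  intro d _ hpre
  unfold Spec_has_loop
  match d, hpre with
  | (k0, v0) :: t, _ =>
    simp only [has_loop, has_loop_alt]
    set d' := (k0, v0) :: t with hd'
    have hlen : 1 ≤ d'.length := by rw [hd']; simp
    have hk00 : pvChain d' 0 k0 = some k0 := rfl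
    cases hB : floydGo d' k0 k0 (d'.length * d'.length + 1) with
    | true =>
      -- Floyd met ⇒ chain alive forever ⇒ A cannot exit ⇒ A returns true
      obtain ⟨j, hj1, hjm, hjs⟩ := floyd_true_meet d' k0 _ 0 k0 k0 hk00 hk00 hB
      have halive := meet_alive d' k0 j hj1 hjm hjs
      cases hA : aGo d' PySem.Set.empty k0 (d'.length + 1) with
      | true => rfl
      | false =>
        obtain ⟨m, _, hnone⟩ := aGo_false_exit d' (d'.length + 1) PySem.Set.empty k0
          (by simp [PySem.Set.empty]) (by intro x hx; simp [PySem.Set.empty] at hx)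
          (by simp [PySem.Set.empty]) hA
        have := halive (m + 1)
        rw [hnone] at this
        simp at this
    | false =>
      -- Floyd did not meet within n²+1 ⇒ the chain dies ⇒ A returns false
      cases hA : aGo d' PySem.Set.empty k0 (d'.length + 1) with
      | false => rfl
      | true =>
        have halive := aGo_true_alive d' (d'.length + 1) PySem.Set.empty k0
          (by intro x hx; simp [PySem.Set.empty] at hx) hA
        obtain ⟨j, hj1, hj2, hjm⟩ := exists_meet d' k0 hlen halive
        have := floyd_true_of_meet d' k0 (d'.length * d'.length + 1) 0 k0 k0 halive
          ⟨j, by omega, by omega, hjm⟩ hk00 hk00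
        rw [hB] at this
        exact absurd this (by simp)
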